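-- pv_equiv track=rewrite | github.com/zcTresure/LeetCode_Python | questions/1-1000/400-499/458. 可怜的小猪.py | poorPigs
-- ===== SOURCE A (Python) =====
-- def poorPigs(buckets: int, minutesToDie: int, minutesToTest: int) -> int:
--     if buckets == 1:
--         return 0
--     combinations = [[0] * (buckets + 1) for _ in range(buckets + 1)]
--     combinations[0][0] = 1
--     iterations = minutesToTest // minutesToDie
--     f = [[1] * (iterations + 1)] + [[1] + [0] * iterations for _ in range(buckets - 1)]
--     for i in range(1, buckets):
--         combinations[i][0] = 1
--         for j in range(1, i):
--             combinations[i][j] = combinations[i - 1][j - 1] + combinations[i - 1][j]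
--         combinations[i][i] = 1
--         for j in range(1, iterations + 1):
--             for k in range(i + 1):
--                 f[i][j] += f[k][j - 1] * combinations[i][i - k]
--         if f[i][iterations] >= buckets:
--             return i
--     return 0
-- ===== SOURCE B (Python) =====
-- def poorPigs(buckets: int, minutesToDie: int, minutesToTest: int) -> int:
--     if buckets == 1:
--         return 0
--     states = minutesToTest // minutesToDie + 1
--     power = 1
--     for pigs in range(1, buckets):
--         power *= states
--         if power >= buckets:
--             return pigs
--     return 0
-- ===== Notes on version B (the rewrite author's own statement) =====
-- stated objective: faster
-- what changed: Replaces the (buckets+1)x(buckets+1) Pascal-triangle table and the O(buckets^2*iterations) dynamic program f[i][j] (which equals (j+1)^i) by a single running power: return the first i with (iterations+1)^i >= buckets.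
import Mathlib
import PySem

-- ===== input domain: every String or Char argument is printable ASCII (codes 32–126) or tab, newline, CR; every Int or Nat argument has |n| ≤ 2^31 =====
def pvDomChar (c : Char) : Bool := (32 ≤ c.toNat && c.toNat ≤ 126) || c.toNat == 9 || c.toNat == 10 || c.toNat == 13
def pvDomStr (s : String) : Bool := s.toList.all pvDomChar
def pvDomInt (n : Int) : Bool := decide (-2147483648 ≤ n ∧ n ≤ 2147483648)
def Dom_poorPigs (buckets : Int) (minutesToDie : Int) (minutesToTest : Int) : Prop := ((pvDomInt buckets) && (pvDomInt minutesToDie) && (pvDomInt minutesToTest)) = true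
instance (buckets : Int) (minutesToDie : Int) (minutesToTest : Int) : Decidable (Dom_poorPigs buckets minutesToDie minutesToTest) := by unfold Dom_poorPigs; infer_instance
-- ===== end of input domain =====

-- B replaces A's O(buckets^2 * iterations) binomial/DP table (whose f[i][j] equals (j+1)^i)
-- by a single running power, returning the first i with (iterations+1)^i >= buckets.

-- ===== PORT A =====
-- Python m[i][j] read and m[i][j] = v write (defaults only hit outside Pre_, where Python raises)
def pvGet2 (m : List (List Int)) (i j : Int) : Int :=
  PySem.List.pyGetD (PySem.List.pyGetD m i []) j 0

def pvSet2 (m : List (List Int)) (i j : Int) (v : Int) : List (List Int) :=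
  PySem.List.pySetD m i (PySem.List.pySetD (PySem.List.pyGetD m i []) j v)

-- body of `for i in range(1, buckets)`: the writes to row i of combinations
def pvStepComb (i : Int) (comb : List (List Int)) : List (List Int) :=
  let comb := pvSet2 comb i 0 1
  let comb := (PySem.List.pyRange 1 i 1).foldl
    (fun c j => pvSet2 c i j (pvGet2 c (i-1) (j-1) + pvGet2 c (i-1) j)) comb
  pvSet2 comb i i 1

-- the nested `for j … for k …` updates of f[i][j]
def pvStepF (i it : Int) (comb f : List (List Int)) : List (List Int) :=
  (PySem.List.pyRange 1 (it+1) 1).foldl (fun f j =>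
    (PySem.List.pyRange 0 (i+1) 1).foldl (fun f k =>
      pvSet2 f i j (pvGet2 f i j + pvGet2 f k (j-1) * pvGet2 comb i (i-k))) f) f

-- `for i in range(1, buckets)` with the early return
def pvLoopA (rest : List Int) (it n : Int) (comb f : List (List Int)) : Int :=
  match rest with
  | [] => 0
  | i :: rest =>
    let comb := pvStepComb i comb
    let f := pvStepF i it comb f
    if pvGet2 f i it ≥ n then i else pvLoopA rest it n comb f

def poorPigs (buckets : Int) (minutesToDie : Int) (minutesToTest : Int) : Int :=
  if buckets = 1 then 0
  else
    let comb := List.replicate (buckets+1).toNat (List.replicate (buckets+1).toNat 0)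
    let comb := pvSet2 comb 0 0 1
    let it := PySem.Int.floordiv minutesToTest minutesToDie
    let f := (List.replicate (it+1).toNat 1) ::
             List.replicate (buckets-1).toNat (1 :: List.replicate it.toNat 0)
    pvLoopA (PySem.List.pyRange 1 buckets 1) it buckets comb f

-- ===== PORT B =====
def pvLoopB (rest : List Int) (states power n : Int) : Int :=
  match rest with
  | [] => 0
  | i :: rest =>
    let power := power * states
    if power ≥ n then i else pvLoopB rest states power n

def poorPigs_alt (buckets : Int) (minutesToDie : Int) (minutesToTest : Int) : Int :=
  if buckets = 1 then 0
  else
    let states := PySem.Int.floordiv minutesToTest minutesToDie + 1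
    pvLoopB (PySem.List.pyRange 1 buckets 1) states 1 buckets

-- ===== PRECONDITION & SPEC =====
-- Pre_ is exactly the set of inputs on which A returns: A raises IndexError for buckets ≤ -1,
-- ZeroDivisionError for minutesToDie = 0 (unless buckets = 1, which returns before dividing),
-- and IndexError when buckets ≥ 2 and minutesToTest//minutesToDie ≤ -2.
def Pre_poorPigs (buckets : Int) (minutesToDie : Int) (minutesToTest : Int) : Prop :=
  buckets = 1 ∨ (0 ≤ buckets ∧ minutesToDie ≠ 0 ∧
    (buckets < 2 ∨ -1 ≤ PySem.Int.floordiv minutesToTest minutesToDie))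
instance (buckets : Int) (minutesToDie : Int) (minutesToTest : Int) : Decidable (Pre_poorPigs buckets minutesToDie minutesToTest) := by unfold Pre_poorPigs; infer_instance

def pvWitness_poorPigs : Int × Int × Int := (1000, 15, 60)

def Spec_poorPigs (buckets : Int) (minutesToDie : Int) (minutesToTest : Int) (out : Int) : Prop := out = poorPigs_alt buckets minutesToDie minutesToTest
instance (buckets : Int) (minutesToDie : Int) (minutesToTest : Int) (out : Int) : Decidable (Spec_poorPigs buckets minutesToDie minutesToTest out) := by unfold Spec_poorPigs; infer_instance

-- ===== CLAIM (what is proved, stated in full; the proofs are below) =====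
def Claim_equal_poorPigs : Prop := ∀ (buckets : Int) (minutesToDie : Int) (minutesToTest : Int), Dom_poorPigs buckets minutesToDie minutesToTest → Pre_poorPigs buckets minutesToDie minutesToTest → Spec_poorPigs buckets minutesToDie minutesToTest (poorPigs buckets minutesToDie minutesToTest)


-- ===== LEMMAS AND PROOFS =====

-- Closed forms of the rows/matrices A builds: combinations row r is Pascal's row r,
-- f's processed row r is j ↦ (j+1)^r; the P-variants are partially processed rows.
def combRow (len r : Nat) : List Int :=
  (List.range len).map (fun j => if j ≤ r then ((r.choose j : Nat) : Int) else 0)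
def combRowP (len r jd : Nat) : List Int :=
  (List.range len).map (fun j => if j = 0 then 1 else if j < jd then ((r.choose j : Nat) : Int) else 0)
def combMat (len i : Nat) : List (List Int) :=
  (List.range len).map (fun r => if r < i then combRow len r else List.replicate len 0)
def fRowD (T r : Nat) : List Int := (List.range (T+1)).map (fun j : Nat => ((j : Int)+1)^r)
def fRowF (T : Nat) : List Int := 1 :: List.replicate T 0
def fRowP (T r jd : Nat) : List Int :=
  (List.range (T+1)).map (fun j : Nat => if j < jd then ((j : Int)+1)^r else if j = 0 then 1 else 0)
def fMat (N T i : Nat) : List (List Int) :=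
  (List.range N).map (fun r => if r < i then fRowD T r else fRowF T)

lemma set_map_range {α : Type} (len k : Nat) (f g : Nat → α) (v : α)
    (hfg : ∀ j, j < len → (if k = j then v else f j) = g j) :
    ((List.range len).map f).set k v = (List.range len).map g := by
  apply List.ext_getElem (by simp)
  intro n h1 h2
  have hn : n < len := by simpa using h1
  rw [List.getElem_set]
  simp only [List.getElem_map, List.getElem_range]
  exact hfg n hn

lemma replicate_eq_map (len : Nat) {α : Type} (x : α) :
    List.replicate len x = (List.range len).map (fun _ => x) := by
  simp [List.map_const']

lemma getD_set_self {α : Type} (m : List α) (a : Nat) (v d : α) (h : a < m.length) :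
    (m.set a v).getD a d = v := by
  simp [List.getD_eq_getElem?_getD, h]

lemma getD_set_ne {α : Type} (m : List α) (a b : Nat) (v d : α) (h : a ≠ b) :
    (m.set a v).getD b d = m.getD b d := by
  simp [List.getD_eq_getElem?_getD, List.getElem?_set_ne h]

lemma mapRange_getD {α : Type} (len r : Nat) (f : Nat → α) (d : α) (hr : r < len) :
    ((List.range len).map f).getD r d = f r := by
  simp [List.getD_eq_getElem?_getD, hr]

lemma pvGet2_natCast (m : List (List Int)) (a b : Nat) :
    pvGet2 m (a : Int) (b : Int) = (m.getD a []).getD b 0 := by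
  simp [pvGet2]

lemma pvSet2_natCast (m : List (List Int)) (a b : Nat) (v : Int) :
    pvSet2 m (a : Int) (b : Int) v = m.set a ((m.getD a []).set b v) := by
  simp [pvSet2]

lemma pvSet2_nat0 (m : List (List Int)) (a : Nat) (v : Int) :
    pvSet2 m (a : Int) 0 v = m.set a ((m.getD a []).set 0 v) := by
  simpa using pvSet2_natCast m a 0 v

lemma pvSet2_zero (m : List (List Int)) (v : Int) :
    pvSet2 m 0 0 v = m.set 0 ((m.getD 0 []).set 0 v) := by
  simpa using pvSet2_natCast m 0 0 v

lemma combRow_getD (len r j : Nat) (hj : j < len) :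
    (combRow len r).getD j 0 = if j ≤ r then ((r.choose j : Nat) : Int) else 0 := by
  simp [combRow, List.getD_eq_getElem?_getD, hj]

lemma combMat_getD (len i r : Nat) (hr : r < len) :
    (combMat len i).getD r [] = if r < i then combRow len r else List.replicate len 0 :=
  mapRange_getD _ _ _ _ hr

lemma fMat_getD (N T i r : Nat) (hr : r < N) :
    (fMat N T i).getD r [] = if r < i then fRowD T r else fRowF T :=
  mapRange_getD _ _ _ _ hr

lemma fRowP_length (T r jd : Nat) : (fRowP T r jd).length = T+1 := by simp [fRowP]
lemma fMat_length (N T i : Nat) : (fMat N T i).length = N := by simp [fMat]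
lemma combMat_length (len i : Nat) : (combMat len i).length = len := by simp [combMat]

lemma combRowP_set (len r jd : Nat) (h1 : 1 ≤ jd) :
    (combRowP len r jd).set jd ((r.choose jd : Nat) : Int) = combRowP len r (jd+1) := by
  apply set_map_range
  intro j hjl
  by_cases h : jd = j
  · subst h; simp; omega
  · simp only [if_neg h]; split_ifs <;> first | rfl | omega

lemma combRowP_last (len i : Nat) :
    (combRowP len i i).set i 1 = combRow len i := by
  apply set_map_range
  intro j hjl
  by_cases h : i = j
  · subst h; simp [Nat.choose_self]
  · simp only [if_neg h]
    by_cases h0 : j = 0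
    · subst h0; simp
    · simp only [if_neg h0]; split_ifs <;> first | rfl | omega

lemma combMat_set (len i : Nat) :
    (combMat len i).set i (combRow len i) = combMat len (i+1) := by
  apply set_map_range
  intro j hjl
  by_cases h : i = j
  · subst h; simp
  · simp only [if_neg h]; split_ifs <;> first | rfl | omega

lemma fMat_set_last (N T i : Nat) (hi : i < N) :
    (fMat N T i).set i (fRowD T i) = fMat N T (i+1) := by
  apply set_map_range
  intro j hjl
  by_cases h : i = j
  · subst h; simp
  · simp only [if_neg h]; split_ifs <;> first | rfl | omega

lemma fRowF_eq_map (T : Nat) :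
    fRowF T = (List.range (T+1)).map (fun j => if j = 0 then 1 else 0) := by
  apply List.ext_getElem (by simp [fRowF])
  intro n h1 h2
  rcases n with _ | n
  · simp [fRowF]
  · simp only [fRowF, List.length_cons, List.length_replicate] at h1
    simp [fRowF, List.getElem_replicate]

lemma fRowP_one (T r : Nat) : fRowP T r 1 = fRowF T := by
  rw [fRowF_eq_map]
  unfold fRowP
  apply List.map_congr_left
  intro j _
  by_cases h0 : j = 0
  · subst h0; simp
  · simp only [if_neg h0]
    rw [if_neg (by omega : ¬ j < 1)]

lemma fRowP_last (T r : Nat) : fRowP T r (T+1) = fRowD T r := by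
  unfold fRowP fRowD
  apply List.map_congr_left
  intro j hj
  simp only [List.mem_range] at hj
  rw [if_pos hj]

lemma fRowP_set_zero (T r j : Nat) (h1 : 1 ≤ j) :
    (fRowP T r j).set j 0 = fRowP T r j := by
  apply set_map_range
  intro j' hj'
  by_cases h : j = j'
  · subst h; rw [if_pos rfl, if_neg (by omega), if_neg (by omega)]
  · rw [if_neg h]

lemma fRowP_set (T r j : Nat) (h1 : 1 ≤ j) :
    (fRowP T r j).set j (((j:Int)+1)^r) = fRowP T r (j+1) := by
  apply set_map_range
  intro j' hj'
  by_cases h : j = j'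
  · subst h; rw [if_pos rfl, if_pos (by omega)]
  · rw [if_neg h]
    split_ifs <;> first | rfl | omega

lemma fMat_set_self (N T i : Nat) :
    (fMat N T i).set i (fRowF T) = fMat N T i := by
  apply set_map_range
  intro j hj
  by_cases h : i = j
  · subst h; rw [if_pos rfl, if_neg (by omega)]
  · rw [if_neg h]

lemma rowP_init (len r : Nat) : (List.replicate len (0:Int)).set 0 1 = combRowP len r 1 := by
  rw [replicate_eq_map]
  apply set_map_range
  intro j hjl
  by_cases h0 : 0 = j
  · subst h0; simp
  · rw [if_neg h0]; split_ifs <;> first | rfl | omega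

lemma S_top (i : Nat) (x : Int) :
    ∑ k ∈ Finset.range (i+1), x^k * ((i.choose (i-k) : Nat) : Int) = (x+1)^i := by
  rw [add_pow]
  apply Finset.sum_congr rfl
  intro k hk
  rw [Finset.mem_range] at hk
  rw [Nat.choose_symm (by omega)]
  simp

lemma stepComb_fold (len i : Nat) (h1 : 1 ≤ i) (hi : i < len) :
    ∀ jd : Nat, 1 ≤ jd → jd ≤ i →
    (PySem.List.pyRange 1 (jd : Int) 1).foldl
        (fun c j => pvSet2 c (i : Int) j (pvGet2 c ((i : Int)-1) (j-1) + pvGet2 c ((i : Int)-1) j))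
        ((combMat len i).set i (combRowP len i 1))
      = (combMat len i).set i (combRowP len i jd) := by
  intro jd
  induction jd with
  | zero => omega
  | succ jd ih =>
    intro _ hle
    rcases Nat.eq_zero_or_pos jd with hjd0 | hjd1
    · subst hjd0
      rw [show ((0+1 : Nat) : Int) = 1 by norm_num, PySem.List.pyRange_one_eq_nil le_rfl]
      rfl
    · have hcast : ((jd+1 : Nat) : Int) = (jd : Int) + 1 := by push_cast; ring
      rw [hcast, PySem.List.pyRange_one_succ_right (by exact_mod_cast Nat.one_le_iff_ne_zero.mpr (by omega)), List.foldl_append]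
      rw [ih hjd1 (by omega)]
      set M := (combMat len i).set i (combRowP len i jd) with hM
      simp only [List.foldl_cons, List.foldl_nil]
      have hMi : M.getD i [] = combRowP len i jd :=
        getD_set_self _ _ _ _ (by rw [combMat_length]; exact hi)
      have hMi1 : M.getD (i-1) [] = combRow len (i-1) := by
        rw [hM, getD_set_ne _ _ _ _ _ (by omega), combMat_getD _ _ _ (by omega), if_pos (by omega)]
      have c1 : ((i : Int) - 1) = ((i-1 : Nat) : Int) := by omega
      have c2 : ((jd : Int) - 1) = ((jd-1 : Nat) : Int) := by omega
      rw [c1, c2, pvGet2_natCast, pvGet2_natCast, hMi1]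
      rw [combRow_getD _ _ _ (by omega), combRow_getD _ _ _ (by omega)]
      rw [if_pos (by omega : jd - 1 ≤ i - 1), if_pos (by omega : jd ≤ i - 1)]
      have hch : ((i-1).choose (jd-1) : Int) + ((i-1).choose jd : Int) = (i.choose jd : Int) := by
        have h' : i.choose jd = (i-1).choose (jd-1) + (i-1).choose jd := by
          have e1 : i = (i-1) + 1 := by omega
          have e2 : jd = (jd-1) + 1 := by omega
          rw [e1, e2, Nat.choose_succ_succ]
          simp
        rw [h']; push_cast; ring
      rw [hch, pvSet2_natCast, hMi]
      rw [hM, List.set_set, combRowP_set _ _ _ hjd1]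

lemma stepComb_eq (len i : Nat) (h1 : 1 ≤ i) (hi : i < len) :
    pvStepComb (i : Int) (combMat len i) = combMat len (i+1) := by
  have h0 : pvSet2 (combMat len i) (i:Int) 0 1 = (combMat len i).set i (combRowP len i 1) := by
    rw [pvSet2_nat0, combMat_getD _ _ _ hi, if_neg (by omega), rowP_init len i]
  unfold pvStepComb
  simp only [h0]
  rw [stepComb_fold len i h1 hi i h1 le_rfl, pvSet2_natCast,
    getD_set_self _ _ _ _ (by rw [combMat_length]; exact hi),
    List.set_set, combRowP_last, combMat_set]

lemma stepF_inner (N T i j : Nat) (h1 : 1 ≤ i) (hi : i < N) (hj1 : 1 ≤ j) (hjT : j ≤ T) :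
    ∀ kd : Nat, kd ≤ i+1 →
    (PySem.List.pyRange 0 (kd : Int) 1).foldl
        (fun f k => pvSet2 f (i:Int) (j:Int)
          (pvGet2 f (i:Int) (j:Int) + pvGet2 f k ((j:Int)-1) * pvGet2 (combMat (N+1) (i+1)) (i:Int) ((i:Int)-k)))
        ((fMat N T i).set i (fRowP T i j))
      = (fMat N T i).set i ((fRowP T i j).set j
          (∑ k ∈ Finset.range kd, ((j:Int))^k * ((i.choose (i-k) : Nat) : Int))) := by
  intro kd
  induction kd with
  | zero =>
    intro _
    rw [Nat.cast_zero, PySem.List.pyRange_one_eq_nil le_rfl, List.foldl_nil,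
      Finset.sum_range_zero, fRowP_set_zero _ _ _ hj1]
  | succ kd ih =>
    intro hkd
    rw [show ((kd+1 : Nat) : Int) = (kd : Int) + 1 by push_cast; ring,
      PySem.List.pyRange_one_succ_right (by positivity), List.foldl_append,
      ih (by omega), List.foldl_cons, List.foldl_nil]
    set S := ∑ k ∈ Finset.range kd, ((j:Int))^k * ((i.choose (i-k) : Nat) : Int) with hS
    set X := (fMat N T i).set i ((fRowP T i j).set j S) with hX
    have hXi : X.getD i [] = (fRowP T i j).set j S :=
      getD_set_self _ _ _ _ (by rw [fMat_length]; exact hi)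
    have ha : pvGet2 X (i:Int) (j:Int) = S := by
      rw [pvGet2_natCast, hXi, getD_set_self _ _ _ _ (by rw [fRowP_length]; omega)]
    have hb : pvGet2 X (kd:Int) ((j:Int)-1) = ((j:Int))^kd := by
      rw [show ((j:Int)-1) = ((j-1 : Nat) : Int) by omega, pvGet2_natCast]
      have hcast : ((j-1 : Nat) : Int) + 1 = (j : Int) := by omega
      rcases Nat.lt_or_ge kd i with hki | hki
      · rw [hX, getD_set_ne _ _ _ _ _ (by omega), fMat_getD _ _ _ _ (by omega), if_pos hki]
        rw [show fRowD T kd = (List.range (T+1)).map (fun j : Nat => ((j : Int)+1)^kd) from rfl]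
        rw [mapRange_getD _ _ _ _ (by omega), hcast]
      · have hki' : kd = i := by omega
        subst hki'
        rw [hXi, getD_set_ne _ _ _ _ _ (by omega)]
        rw [show fRowP T kd j = (List.range (T+1)).map (fun j' : Nat => if j' < j then ((j' : Int)+1)^kd else if j' = 0 then 1 else 0) from rfl]
        rw [mapRange_getD _ _ _ _ (by omega), if_pos (by omega), hcast]
    have hc : pvGet2 (combMat (N+1) (i+1)) (i:Int) ((i:Int)-(kd:Int)) = ((i.choose (i-kd) : Nat) : Int) := by
      rw [show ((i:Int)-(kd:Int)) = ((i-kd : Nat) : Int) by omega, pvGet2_natCast,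
        combMat_getD _ _ _ (by omega), if_pos (by omega), combRow_getD _ _ _ (by omega),
        if_pos (by omega)]
    rw [ha, hb, hc, pvSet2_natCast, hXi, hX, List.set_set, List.set_set]
    rw [show S + ((j:Int))^kd * ((i.choose (i-kd) : Nat) : Int)
        = ∑ k ∈ Finset.range (kd+1), ((j:Int))^k * ((i.choose (i-k) : Nat) : Int) by
      rw [Finset.sum_range_succ, hS]]

lemma stepF_outer (N T i : Nat) (h1 : 1 ≤ i) (hi : i < N) :
    ∀ jd : Nat, 1 ≤ jd → jd ≤ T+1 →
    (PySem.List.pyRange 1 (jd : Int) 1).foldl (fun f j =>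
        (PySem.List.pyRange 0 ((i+1 : Nat) : Int) 1).foldl (fun f k =>
          pvSet2 f (i:Int) j (pvGet2 f (i:Int) j + pvGet2 f k (j-1) * pvGet2 (combMat (N+1) (i+1)) (i:Int) ((i:Int)-k))) f)
        (fMat N T i)
      = (fMat N T i).set i (fRowP T i jd) := by
  intro jd
  induction jd with
  | zero => omega
  | succ jd ih =>
    intro _ hle
    rcases Nat.eq_zero_or_pos jd with hjd0 | hjd1
    · subst hjd0
      rw [show ((0+1 : Nat) : Int) = 1 by norm_num, PySem.List.pyRange_one_eq_nil le_rfl,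
        List.foldl_nil, fRowP_one, fMat_set_self]
    · rw [show ((jd+1 : Nat) : Int) = (jd : Int) + 1 by push_cast; ring,
        PySem.List.pyRange_one_succ_right (a := 1) (b := (jd : Int)) (by exact_mod_cast hjd1),
        List.foldl_append, ih hjd1 (by omega), List.foldl_cons, List.foldl_nil]
      rw [stepF_inner N T i jd h1 hi hjd1 (by omega) (i+1) le_rfl]
      rw [S_top, fRowP_set _ _ _ hjd1]

lemma stepF_eq (N T i : Nat) (h1 : 1 ≤ i) (hi : i < N) :
    pvStepF (i : Int) (T : Int) (combMat (N+1) (i+1)) (fMat N T i) = fMat N T (i+1) := by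
  unfold pvStepF
  rw [show ((T:Int)+1) = ((T+1 : Nat) : Int) by push_cast; ring,
    show ((i:Int)+1) = ((i+1 : Nat) : Int) by push_cast; ring]
  rw [stepF_outer N T i h1 hi (T+1) (by omega) le_rfl]
  rw [fRowP_last, fMat_set_last _ _ _ hi]

lemma fMat_get (N T i : Nat) (hi : i < N) :
    pvGet2 (fMat N T (i+1)) (i : Int) (T : Int) = ((T : Int)+1)^i := by
  rw [pvGet2_natCast, fMat_getD _ _ _ _ hi, if_pos (by omega)]
  rw [show fRowD T i = (List.range (T+1)).map (fun j : Nat => ((j : Int)+1)^i) from rfl]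
  rw [mapRange_getD _ _ _ _ (by omega)]

lemma comb_init (len : Nat) (h : 1 ≤ len) :
    pvSet2 (List.replicate len (List.replicate len (0:Int))) 0 0 1 = combMat len 1 := by
  rw [pvSet2_zero]
  have hg : (List.replicate len (List.replicate len (0:Int))).getD 0 [] = List.replicate len 0 := by
    rw [replicate_eq_map, mapRange_getD _ _ _ _ (by omega)]
  rw [hg, rowP_init len 0, replicate_eq_map]
  apply set_map_range
  intro j hjl
  by_cases h0 : 0 = j
  · subst h0
    rw [if_pos rfl, if_pos (by omega)]
    unfold combRowP combRow
    apply List.map_congr_left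
    intro j' _
    split_ifs <;> first | rfl | omega | simp_all
  · rw [if_neg h0, if_neg (by omega : ¬ j < 1)]

lemma f_init (N T : Nat) (h : 1 ≤ N) :
    (List.replicate (T+1) (1:Int)) :: List.replicate (N-1) (1 :: List.replicate T 0) = fMat N T 1 := by
  apply List.ext_getElem (by simp [fMat]; omega)
  intro n h1 h2
  rcases n with _ | n
  · simp only [List.getElem_cons_zero, fMat, List.getElem_map, List.getElem_range]
    rw [if_pos (by omega : (0:Nat) < 1)]
    rw [replicate_eq_map]
    unfold fRowD
    apply List.map_congr_left
    intro j _
    simp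
  · simp only [List.length_cons, List.length_replicate] at h1
    simp only [List.getElem_cons_succ, List.getElem_replicate, fMat, List.getElem_map,
      List.getElem_range]
    rw [if_neg (by omega : ¬ n + 1 < 1)]
    rfl

lemma loops_agree (N T : Nat) (hN : 2 ≤ N) :
    ∀ (d i : Nat), 1 ≤ i → i + d = N →
    pvLoopA (PySem.List.pyRange (i : Int) (N : Int) 1) (T : Int) (N : Int)
        (combMat (N+1) i) (fMat N T i)
      = pvLoopB (PySem.List.pyRange (i : Int) (N : Int) 1) ((T : Int)+1)
        (((T : Int)+1)^(i-1)) (N : Int) := by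
  intro d
  induction d with
  | zero =>
    intro i h1 h2
    rw [PySem.List.pyRange_one_eq_nil (by exact_mod_cast Nat.le_of_eq (by omega))]
    rfl
  | succ d ih =>
    intro i h1 h2
    have hiN : i < N := by omega
    rw [PySem.List.pyRange_one_cons (by exact_mod_cast hiN)]
    simp only [pvLoopA, pvLoopB]
    rw [stepComb_eq (N+1) i h1 (by omega), stepF_eq N T i h1 hiN, fMat_get N T i hiN]
    have hpow : ((T:Int)+1)^(i-1) * ((T:Int)+1) = ((T:Int)+1)^i := by
      rw [← pow_succ]
      congr 1
      omega
    rw [hpow]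
    by_cases hcond : ((T:Int)+1)^i ≥ (N:Int)
    · rw [if_pos hcond, if_pos hcond]
    · rw [if_neg hcond, if_neg hcond]
      rw [show ((i:Int)+1) = ((i+1 : Nat) : Int) by push_cast; ring]
      have := ih (i+1) (by omega) (by omega)
      simpa using this

-- degenerate case iterations = -1: every f row the loop reads is [1] (< buckets), f never changes
lemma loopA_negone (n : Int) (hn : 2 ≤ n) :
    ∀ (l : List Int) (comb f : List (List Int)),
      (∀ x ∈ l, PySem.List.pyGetD f x [] = [1]) → pvLoopA l (-1) n comb f = 0 := by
  intro l
  induction l with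
  | nil => intro comb f _; rfl
  | cons x l ih =>
    intro comb f hf
    have hstep : pvStepF x (-1) (pvStepComb x comb) f = f := by
      unfold pvStepF
      rw [show (-1 + 1 : Int) = 0 by norm_num,
        PySem.List.pyRange_one_eq_nil (a := 1) (b := 0) (by norm_num), List.foldl_nil]
    simp only [pvLoopA]
    rw [hstep]
    have hget : pvGet2 f x (-1) = 1 := by
      unfold pvGet2
      rw [hf x List.mem_cons_self]
      decide
    rw [hget, if_neg (by omega)]
    exact ih _ _ (fun y hy => hf y (List.mem_cons_of_mem _ hy))

lemma loopB_zero (n : Int) (hn : 2 ≤ n) :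
    ∀ (l : List Int) (p : Int), pvLoopB l 0 p n = 0 := by
  intro l
  induction l with
  | nil => intro p; rfl
  | cons x l ih =>
    intro p
    simp only [pvLoopB, mul_zero]
    rw [if_neg (by omega)]
    exact ih 0

-- ===== VERDICT (by name: the statement is the Claim_ definition above) =====
theorem poorPigs_spec : Claim_equal_poorPigs := by
  unfold Claim_equal_poorPigs
  intro b md mt _ hpre
  unfold Spec_poorPigs
  by_cases hb1 : b = 1
  · simp [poorPigs, poorPigs_alt, hb1]
  rcases hpre with h | ⟨hb0, hmd, hcase⟩
  · exact absurd h hb1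
  simp only [poorPigs, poorPigs_alt, if_neg hb1]
  set it := PySem.Int.floordiv mt md with hit
  by_cases hb0' : b = 0
  · subst hb0'
    rw [PySem.List.pyRange_one_eq_nil (by norm_num)]
    rfl
  have hb2 : 2 ≤ b := by omega
  have hit1 : -1 ≤ it := by
    rcases hcase with h | h
    · omega
    · exact h
  rcases Int.lt_or_le it 0 with hneg | hpos
  · -- iterations = -1
    have hitm1 : it = -1 := by omega
    rw [hitm1, show (-1 + 1 : Int) = 0 by norm_num, loopB_zero b hb2 _ _]
    apply loopA_negone b hb2
    intro x hx
    rw [PySem.List.mem_pyRange_one] at hx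
    rw [show ((0:Int)).toNat = 0 from rfl, show ((-1:Int)).toNat = 0 from rfl]
    rw [PySem.List.pyGetD_eq_getElem _ _ (by omega)
      (by simp only [List.length_cons, List.length_replicate]; push_cast; omega)]
    obtain ⟨k, hk⟩ : ∃ k, x.toNat = k + 1 := ⟨x.toNat - 1, by omega⟩
    simp only [hk, List.getElem_cons_succ]
    rw [List.getElem_replicate]
    rfl
  · -- iterations ≥ 0: the main case
    set N := b.toNat with hNdef
    set T := it.toNat with hTdef
    have hbN : b = (N : Int) := by omega
    have hitT : it = (T : Int) := by omega
    have hN2 : 2 ≤ N := by omega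
    rw [hbN, hitT]
    rw [show ((N:Int)+1).toNat = N+1 by omega, show ((T:Int)+1).toNat = T+1 by omega,
      show ((N:Int)-1).toNat = N-1 by omega]
    rw [comb_init (N+1) (by omega), f_init N T (by omega)]
    have := loops_agree N T hN2 (N-1) 1 le_rfl (by omega)
    simpa using this
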